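-- pv_equiv track=rewrite | github.com/NestorPala/tda-tp3 | prog_lineal.py | calc_coefficient
-- ===== SOURCE A (Python) =====
-- def calc_coefficient(result: dict[int, list[str]], guerreros) -> int:
--     coef = 0
--     group_sums = {}
--
--     for group_number, guerreros_names in result.items():
--         for name in guerreros_names:
--             if group_number not in group_sums:
--                 group_sums[group_number] = 0
--             power_value = guerreros[name]
--             group_sums[group_number] += power_value
--
--     for power_sum in group_sums.values():
--         coef += power_sum ** 2
--
--     return coef
-- ===== SOURCE B (Python) =====
-- def calc_coefficient(result: dict[int, list[str]], guerreros) -> int: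
--     # Incremental algorithm: no per-group table and no squaring operation.
--     # Uses the identity (s + v)**2 = s**2 + 2*s*v + v*v to update the total
--     # coefficient element by element while a group's running sum s grows.
--     coef = 0
--     for names in result.values():
--         s = 0
--         for name in names:
--             v = guerreros[name]
--             coef += 2 * s * v + v * v
--             s += v
--     return coef
-- ===== Notes on version B (the rewrite author's own statement) =====
-- stated objective: alternative
-- what changed: Replaces A's two-phase build-dict-then-square-its-values algorithm by a single pass that never squares at all: the total is updated incrementally per warrior via the binomial identity (s+v)^2 = s^2 + 2sv + v^2, keeping only the current group's running sum; the per-group table disappears.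
import Mathlib
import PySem

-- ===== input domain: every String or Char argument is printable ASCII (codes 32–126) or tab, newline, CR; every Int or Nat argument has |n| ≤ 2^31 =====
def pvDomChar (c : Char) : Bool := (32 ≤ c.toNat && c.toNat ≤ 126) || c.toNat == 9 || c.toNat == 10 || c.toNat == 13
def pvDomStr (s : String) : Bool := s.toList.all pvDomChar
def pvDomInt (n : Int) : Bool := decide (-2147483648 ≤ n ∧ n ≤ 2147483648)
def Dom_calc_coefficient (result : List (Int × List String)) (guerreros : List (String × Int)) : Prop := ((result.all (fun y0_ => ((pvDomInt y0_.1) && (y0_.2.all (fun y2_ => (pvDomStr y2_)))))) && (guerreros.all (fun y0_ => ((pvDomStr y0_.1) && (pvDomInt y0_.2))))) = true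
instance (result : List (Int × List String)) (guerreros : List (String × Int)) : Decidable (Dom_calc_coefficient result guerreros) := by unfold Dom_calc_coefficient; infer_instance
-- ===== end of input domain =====

-- B replaces A's build-dict-then-square-values algorithm by a single squaring-free pass that grows
-- the total per warrior via the identity (s+v)^2 = s^2 + 2sv + v^2; objective: alternative.


-- ===== PORT A =====
def calc_coefficient (result : List (Int × List String)) (guerreros : List (String × Int)) : Int :=
  let gdict := PySem.Dict.ofList guerreros
  let group_sums : PySem.Dict Int Int :=
    result.foldl (fun gs p =>
      p.2.foldl (fun gs name =>
        let gs := if gs.contains p.1 then gs else gs.insert p.1 0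
        gs.insert p.1 (gs.getD p.1 0 + gdict.getD name 0)) gs)
      PySem.Dict.empty
  group_sums.values.foldl (fun coef power_sum => coef + power_sum ^ 2) 0

-- ===== PORT B =====
def calc_coefficient_alt (result : List (Int × List String)) (guerreros : List (String × Int)) : Int :=
  let gdict := PySem.Dict.ofList guerreros
  result.foldl (fun coef p =>
    (p.2.foldl (fun (cs : Int × Int) name =>
        let v := gdict.getD name 0
        (cs.1 + 2 * cs.2 * v + v * v, cs.2 + v))
      (coef, 0)).1) 0

-- ===== PRECONDITION & SPEC =====
-- Pre_ excludes dict-argument lists with duplicate keys (no Python dict can carry them, so the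
-- list form is ambiguous there) and group member names missing from guerreros, on which A raises KeyError.
def Pre_calc_coefficient (result : List (Int × List String)) (guerreros : List (String × Int)) : Prop :=
  (result.map (·.1)).Nodup ∧ (guerreros.map (·.1)).Nodup ∧
  ∀ p ∈ result, ∀ n ∈ p.2, n ∈ guerreros.map (·.1)
instance (result : List (Int × List String)) (guerreros : List (String × Int)) : Decidable (Pre_calc_coefficient result guerreros) := by unfold Pre_calc_coefficient; infer_instance

def pvWitness_calc_coefficient : (List (Int × List String)) × (List (String × Int)) :=
  ([(1, ["a", "b"]), (2, ["b"])], [("a", 3), ("b", 4)])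

def Spec_calc_coefficient (result : List (Int × List String)) (guerreros : List (String × Int)) (out : Int) : Prop := out = calc_coefficient_alt result guerreros
instance (result : List (Int × List String)) (guerreros : List (String × Int)) (out : Int) : Decidable (Spec_calc_coefficient result guerreros out) := by unfold Spec_calc_coefficient; infer_instance

-- ===== CLAIM (what is proved, stated in full; the proofs are below) =====
def Claim_equal_calc_coefficient : Prop := ∀ (result : List (Int × List String)) (guerreros : List (String × Int)), Dom_calc_coefficient result guerreros → Pre_calc_coefficient result guerreros → Spec_calc_coefficient result guerreros (calc_coefficient result guerreros)

-- ===== LEMMAS AND PROOFS =====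

-- A's inner-loop body, named so the lemmas can speak about it (defeq to the lambda in port A).
def pvStep (w : String → Int) (g : Int) (gs : PySem.Dict Int Int) (name : String) : PySem.Dict Int Int :=
  let gs := if gs.contains g then gs else gs.insert g 0
  gs.insert g (gs.getD g 0 + w name)

-- Re-inserting the value a key already holds changes nothing (keys unique).
theorem pv_insert_noop (gs : PySem.Dict Int Int) (g v : Int)
    (hnd : gs.keys.Nodup) (h : gs.get? g = some v) : gs.insert g v = gs := by
  apply PySem.Dict.ext
  have hc : gs.contains g = true := by rw [PySem.Dict.contains_eq_isSome_get?, h]; rfl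
  rw [PySem.Dict.items_insert_of_contains _ _ hc]
  conv_rhs => rw [← List.map_id gs.items]
  apply List.map_congr_left
  intro p hp
  by_cases hpg : p.1 = g
  · obtain ⟨k, u⟩ := p
    simp only at hpg; subst hpg
    have hv := PySem.Dict.get?_of_mem_items _ hp hnd
    rw [h] at hv
    simp [Option.some_inj.mp hv]
  · simp [hpg]

-- A's inner loop over a group whose key is already bound to v accumulates the group's sum there.
theorem pv_inner_present (w : String → Int) (names : List String) (g v : Int)
    (gs : PySem.Dict Int Int) (hnd : gs.keys.Nodup) (h : gs.get? g = some v) :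
    names.foldl (pvStep w g) gs = gs.insert g (v + (names.map w).sum) := by
  induction names generalizing gs v with
  | nil =>
      simp only [List.foldl_nil, List.map_nil, List.sum_nil, add_zero]
      exact (pv_insert_noop gs g v hnd h).symm
  | cons n ns ih =>
      have hc : gs.contains g = true := by rw [PySem.Dict.contains_eq_isSome_get?, h]; rfl
      have hstep : pvStep w g gs n = gs.insert g (v + w n) := by
        simp only [pvStep, hc, if_true, PySem.Dict.getD_eq_get?_getD, h, Option.getD_some]
      rw [List.foldl_cons, hstep,
        ih (v + w n) _ (PySem.Dict.nodup_keys_insert _ _ _ hnd) (PySem.Dict.get?_insert_self gs g _),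
        PySem.Dict.insert_insert_self]
      simp only [List.map_cons, List.sum_cons]
      ring_nf

-- A's inner loop over a fresh nonempty group appends one entry holding the group's power sum.
theorem pv_inner_absent (w : String → Int) (n : String) (ns : List String) (g : Int)
    (gs : PySem.Dict Int Int) (hnd : gs.keys.Nodup) (h : gs.contains g = false) :
    (n :: ns).foldl (pvStep w g) gs = gs.insert g (((n :: ns).map w).sum) := by
  have hstep : pvStep w g gs n = gs.insert g (0 + w n) := by
    simp only [pvStep, h, if_false, Bool.false_eq_true, PySem.Dict.getD_insert_self,
      PySem.Dict.insert_insert_self]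
  rw [List.foldl_cons, hstep,
    pv_inner_present w ns g (0 + w n) _ (PySem.Dict.nodup_keys_insert _ _ _ hnd)
      (PySem.Dict.get?_insert_self gs g _),
    PySem.Dict.insert_insert_self]
  simp only [List.map_cons, List.sum_cons]
  ring_nf

-- A's outer loop from a dict whose keys are disjoint from result's: the final items list.
theorem pv_outer (w : String → Int) (result : List (Int × List String))
    (gs : PySem.Dict Int Int) (hnd : gs.keys.Nodup)
    (hfresh : ∀ p ∈ result, gs.contains p.1 = false)
    (hres : (result.map (·.1)).Nodup) :
    (result.foldl (fun gs p => p.2.foldl (pvStep w p.1) gs) gs).items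
      = gs.items ++ (result.filter (fun p => !p.2.isEmpty)).map (fun p => (p.1, (p.2.map w).sum)) := by
  induction result generalizing gs with
  | nil => simp
  | cons p rest ih =>
      obtain ⟨g, names⟩ := p
      have hfg : gs.contains g = false := hfresh (g, names) (by simp)
      cases names with
      | nil =>
          rw [List.foldl_cons]
          simp only [List.foldl_nil]
          rw [ih gs hnd (fun q hq => hfresh q (by simp [hq])) (by simpa using hres.of_cons)]
          simp
      | cons n ns =>
          rw [List.foldl_cons]
          simp only
          rw [pv_inner_absent w n ns g gs hnd hfg]
          have hnd' := PySem.Dict.nodup_keys_insert gs g (((n :: ns).map w).sum) hnd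
          have hfresh' : ∀ q ∈ rest, (gs.insert g (((n :: ns).map w).sum)).contains q.1 = false := by
            intro q hq
            rw [PySem.Dict.contains_insert]
            have hne : q.1 ≠ g := by
              simp only [List.map_cons, List.nodup_cons] at hres
              intro he; exact hres.1 (he ▸ List.mem_map_of_mem hq)
            simp [hne, hfresh q (by simp [hq])]
          rw [ih _ hnd' hfresh' (by simpa using hres.of_cons)]
          rw [PySem.Dict.items_insert_of_not_contains _ _ hfg]
          simp

-- Dropping empty groups does not change the sum of squared group sums.
theorem pv_filter_sum (w : String → Int) (L : List (Int × List String)) :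
    (((L.filter (fun p => !p.2.isEmpty)).map (fun p => (p.1, (p.2.map w).sum))).map (·.2)).foldl
        (fun c s => c + s ^ 2) 0
      = L.foldl (fun acc p => acc + ((p.2.map w).sum) ^ 2) 0 := by
  rw [PySem.List.foldl_add, PySem.List.foldl_add]
  induction L with
  | nil => simp
  | cons p rest ih =>
      cases hp : p.2.isEmpty
      · simp only [List.filter_cons, hp, Bool.not_false, if_true, List.map_cons, List.sum_cons]
        omega
      · have h0 : (List.map w p.2).sum ^ 2 = 0 := by simp [List.isEmpty_iff.mp hp]
        simp only [List.filter_cons, hp, Bool.not_true, List.map_cons, List.sum_cons, h0]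
        simpa using ih

-- B's inner loop: the running pair (coef, s) ends at (coef + (s+sum)^2 - s^2, s + sum).
theorem pv_b_inner (w : String → Int) (ns : List String) (c s : Int) :
    ns.foldl (fun (cs : Int × Int) name =>
        (cs.1 + 2 * cs.2 * w name + w name * w name, cs.2 + w name)) (c, s)
      = (c + (s + (ns.map w).sum) ^ 2 - s ^ 2, s + (ns.map w).sum) := by
  induction ns generalizing c s with
  | nil => simp
  | cons n ns ih =>
      rw [List.foldl_cons, ih]
      simp only [List.map_cons, List.sum_cons]
      apply Prod.ext <;> simp <;> ring

-- B equals the straightforward sum of squared group sums.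
theorem pv_b_closed (w : String → Int) (L : List (Int × List String)) (c : Int) :
    L.foldl (fun coef p =>
        (p.2.foldl (fun (cs : Int × Int) name =>
            (cs.1 + 2 * cs.2 * w name + w name * w name, cs.2 + w name)) (coef, 0)).1) c
      = L.foldl (fun acc p => acc + ((p.2.map w).sum) ^ 2) c := by
  induction L generalizing c with
  | nil => rfl
  | cons p rest ih =>
      rw [List.foldl_cons, List.foldl_cons, pv_b_inner]
      simp only
      rw [ih]
      ring_nf

-- ===== VERDICT (by name: the statement is the Claim_ definition above) =====
theorem calc_coefficient_spec : Claim_equal_calc_coefficient := by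
  intro result guerreros _hDom hPre
  unfold Spec_calc_coefficient
  have hres := hPre.1
  show (calc_coefficient result guerreros) = _
  have hA : calc_coefficient result guerreros
      = ((result.foldl (fun gs p => p.2.foldl (pvStep (fun name => (PySem.Dict.ofList guerreros).getD name 0) p.1) gs) PySem.Dict.empty).items.map (·.2)).foldl
          (fun coef power_sum => coef + power_sum ^ 2) 0 := rfl
  rw [hA, pv_outer _ result PySem.Dict.empty PySem.Dict.nodup_keys_empty
    (fun p _ => PySem.Dict.contains_empty p.1) hres]
  have hB : calc_coefficient_alt result guerreros
      = result.foldl (fun acc p => acc + ((p.2.map (fun name => (PySem.Dict.ofList guerreros).getD name 0)).sum) ^ 2) 0 := by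
    unfold calc_coefficient_alt
    exact pv_b_closed _ result 0
  rw [hB]
  simpa using pv_filter_sum (fun name => (PySem.Dict.ofList guerreros).getD name 0) result
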